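-- pv_equiv track=rewrite | github.com/JWray2k/Various-Coursework | CSCI_Gettysburg/Gettysburg.py | uniqueWordCount3
-- ===== SOURCE A (Python) =====
-- def uniqueWordCount3(full):
--     wordFrequency = {} # this is a dictionay, not a set
--     for word in full.split():
--         if word not in wordFrequency:
--             wordFrequency[word] = 1
--         else:
--             wordFrequency[word] += 1
--
--     uniqueWordCount = len(wordFrequency.keys())
--     return uniqueWordCount
-- ===== SOURCE B (Python) =====
-- def uniqueWordCount3(full):
--     words = sorted(full.split())
--     count = 0
--     prev = None
--     for w in words:
--         if prev is None or w != prev: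
--             count += 1
--         prev = w
--     return count
-- ===== Notes on version B (the rewrite author's own statement) =====
-- stated objective: alternative
-- what changed: Replaces the hash-dictionary frequency table with a sort-then-adjacent-compare scan: split once, sort the words, and count positions where a word differs from its predecessor.
import Mathlib
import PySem

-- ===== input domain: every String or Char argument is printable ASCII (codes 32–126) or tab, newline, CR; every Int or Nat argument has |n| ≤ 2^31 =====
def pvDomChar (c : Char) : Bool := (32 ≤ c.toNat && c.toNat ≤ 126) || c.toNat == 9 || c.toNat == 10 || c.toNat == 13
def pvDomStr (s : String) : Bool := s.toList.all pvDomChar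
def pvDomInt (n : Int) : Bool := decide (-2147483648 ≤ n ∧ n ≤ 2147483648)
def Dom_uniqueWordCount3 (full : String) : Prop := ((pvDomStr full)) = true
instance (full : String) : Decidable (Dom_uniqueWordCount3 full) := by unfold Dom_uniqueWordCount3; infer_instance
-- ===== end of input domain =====

-- B replaces A's hash-dictionary frequency table with a sort-then-adjacent-compare scan (alternative decomposition, same result).

-- ===== PORT A =====
-- for word in full.split(): if word not in wordFrequency: d[word]=1 else: d[word]+=1; return len(d.keys())
def uniqueWordCount3 (full : String) : Int :=
  let wordFrequency :=
    (PySem.Str.split₀ full).foldl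
      (fun d word =>
        if d.contains word = false then d.insert word 1
        else d.insert word (d.getD word 0 + 1))
      (PySem.Dict.empty : PySem.Dict String Int)
  ((wordFrequency.keys).length : Int)

-- ===== PORT B =====
-- the loop: for w in words: if prev is None or w != prev: count += 1; prev = w
def pvLoopB : Option String → Int → List String → Int
  | _, count, [] => count
  | prev, count, w :: rest =>
      pvLoopB (some w) (if prev = none ∨ some w ≠ prev then count + 1 else count) rest

def uniqueWordCount3_alt (full : String) : Int :=
  let words := PySem.List.sorted (PySem.Str.split₀ full) (fun w => w) false
  pvLoopB none 0 words

-- ===== PRECONDITION & SPEC =====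
def Spec_uniqueWordCount3 (full : String) (out : Int) : Prop := out = uniqueWordCount3_alt full
instance (full : String) (out : Int) : Decidable (Spec_uniqueWordCount3 full out) := by unfold Spec_uniqueWordCount3; infer_instance

-- ===== CLAIM (what is proved, stated in full; the proofs are below) =====
def Claim_equal_uniqueWordCount3 : Prop := ∀ (full : String), Dom_uniqueWordCount3 full → Spec_uniqueWordCount3 full (uniqueWordCount3 full)

-- ===== LEMMAS AND PROOFS =====

-- On a sorted tail (previous word p ≤ everything in l), the scan adds the number of distinct words of l other than p.
theorem pvLoopB_some (l : List String) : ∀ (p : String) (c : Int),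
    (p :: l).Pairwise (· ≤ ·) → pvLoopB (some p) c l = c + ((l.toFinset.erase p).card : Int) := by
  induction l with
  | nil => intro p c _; simp [pvLoopB]
  | cons x xs ih =>
    intro p c hpw
    have hpx : p ≤ x := (List.pairwise_cons.1 hpw).1 x (by simp)
    have hxs : (x :: xs).Pairwise (· ≤ ·) := (List.pairwise_cons.1 hpw).2
    by_cases hxp : x = p
    · subst hxp
      have : pvLoopB (some x) c (x :: xs) = pvLoopB (some x) c xs := by
        simp [pvLoopB]
      rw [this, ih x c hxs]
      congr 2
      rw [List.toFinset_cons, Finset.erase_insert_eq_erase]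
    · have hstep : pvLoopB (some p) c (x :: xs) = pvLoopB (some x) (c + 1) xs := by
        simp [pvLoopB, hxp]
      rw [hstep, ih x (c + 1) hxs]
      have hplt : ∀ y ∈ (x :: xs), p < y := by
        intro y hy
        exact lt_of_lt_of_le (lt_of_le_of_ne hpx (fun h => hxp h.symm))
          (by rcases List.mem_cons.1 hy with h | h
              · exact h ▸ le_refl x
              · exact (List.pairwise_cons.1 hxs).1 y h)
      have hpn : p ∉ (x :: xs).toFinset := by
        simp only [List.mem_toFinset]
        intro hmem
        exact absurd rfl (ne_of_gt (hplt p hmem))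
      rw [Finset.erase_eq_of_notMem hpn]
      have hcard : (x :: xs).toFinset.card = (xs.toFinset.erase x).card + 1 := by
        rw [List.toFinset_cons]
        by_cases hx : x ∈ xs.toFinset
        · rw [Finset.insert_eq_self.2 hx, Finset.card_erase_of_mem hx,
            Nat.sub_add_cancel (Finset.card_pos.2 ⟨x, hx⟩)]
        · rw [Finset.erase_eq_of_notMem hx, Finset.card_insert_of_notMem hx]
      rw [hcard]
      push_cast
      ring

-- The full scan from prev = None counts the distinct words of a sorted list.
theorem pvLoopB_none (l : List String) (h : l.Pairwise (· ≤ ·)) :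
    pvLoopB none 0 l = (l.toFinset.card : Int) := by
  cases l with
  | nil => simp [pvLoopB]
  | cons x xs =>
    have : pvLoopB none 0 (x :: xs) = pvLoopB (some x) 1 xs := by simp [pvLoopB]
    rw [this, pvLoopB_some xs x 1 h]
    have hcard : (x :: xs).toFinset.card = (xs.toFinset.erase x).card + 1 := by
      rw [List.toFinset_cons]
      by_cases hx : x ∈ xs.toFinset
      · rw [Finset.insert_eq_self.2 hx, Finset.card_erase_of_mem hx,
          Nat.sub_add_cancel (Finset.card_pos.2 ⟨x, hx⟩)]
      · rw [Finset.erase_eq_of_notMem hx, Finset.card_insert_of_notMem hx]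
    rw [hcard]
    push_cast
    ring

-- A's dict keys are exactly the first occurrences of the words; their count is the finset card.
theorem pvKeysA (ws : List String) :
    ((ws.foldl
      (fun d word =>
        if d.contains word = false then d.insert word 1
        else d.insert word (d.getD word 0 + 1))
      (PySem.Dict.empty : PySem.Dict String Int)).keys) = PySem.Set.ofList ws := by
  have hcongr : ws.foldl
      (fun d word =>
        if d.contains word = false then d.insert word 1
        else d.insert word (d.getD word 0 + 1))
      (PySem.Dict.empty : PySem.Dict String Int)
      = ws.foldl
      (fun d word => d.insert word (if d.contains word = false then 1 else d.getD word 0 + 1))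
      (PySem.Dict.empty : PySem.Dict String Int) := by
    apply PySem.List.foldl_congr_mem
    intro d w _
    by_cases h : d.contains w = false <;> simp [h]
  rw [hcongr, PySem.Dict.keys_foldl_insert]
  rfl

theorem pvNodupLengthCard (l : List String) :
    ((PySem.Set.ofList l).length : Int) = (l.toFinset.card : Int) := by
  have hnd : (PySem.Set.ofList l).Nodup := PySem.Set.nodup_ofList l
  have hfs : (PySem.Set.ofList l).toFinset = l.toFinset := by
    ext x
    simp [List.mem_toFinset, PySem.Set.mem_ofList]
  rw [← hfs, List.toFinset_card_of_nodup hnd]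

-- ===== VERDICT (by name: the statement is the Claim_ definition above) =====
theorem uniqueWordCount3_spec : Claim_equal_uniqueWordCount3 := by
  intro full _
  unfold Spec_uniqueWordCount3 uniqueWordCount3 uniqueWordCount3_alt
  simp only []
  rw [pvKeysA, pvLoopB_none _ (PySem.List.sorted_pairwise (PySem.Str.split₀ full) (fun w => w)),
    pvNodupLengthCard]
  congr 2
  exact List.toFinset_eq_of_perm _ _ (PySem.List.sorted_perm (PySem.Str.split₀ full) (fun w => w) false).symm
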